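-- pv_equiv track=rewrite | github.com/djotaku/adventofcode | 2015/Day_16/Python/part_2.py | find_the_aunt
-- ===== SOURCE A (Python) =====
-- def find_the_aunt(aunt_dictionary):
--     potential_aunts_2 = aunt_dictionary.copy()
--     for key, values in aunt_dictionary.items():
--         if values.get("children") not in [3, None]:
--             del potential_aunts_2[key]
--         elif values.get('cats') is not None and values.get("cats") <= 7:
--             del potential_aunts_2[key]
--         elif values.get("samoyeds") not in [2, None]:
--             del potential_aunts_2[key]
--         elif values.get('pomeranians') is not None and values.get("pomeranians") >= 3:
--             del potential_aunts_2[key]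
--         elif values.get("akitas") not in [0, None]:
--             del potential_aunts_2[key]
--         elif values.get("vizslas") not in [0, None]:
--             del potential_aunts_2[key]
--         elif values.get('goldfish') is not None and values.get("goldfish") >= 5:
--             del potential_aunts_2[key]
--         elif values.get('trees') is not None and values.get("trees") <= 3:
--             del potential_aunts_2[key]
--         elif values.get("cars") not in [2, None]:
--             del potential_aunts_2[key]
--         elif values.get("perfumes") not in [1, None]:
--             del potential_aunts_2[key]
--     return potential_aunts_2
-- ===== SOURCE B (Python) =====
-- CONSTRAINTS = [
--     ("children", lambda v: v == 3),
--     ("cats", lambda v: v > 7),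
--     ("samoyeds", lambda v: v == 2),
--     ("pomeranians", lambda v: v < 3),
--     ("akitas", lambda v: v == 0),
--     ("vizslas", lambda v: v == 0),
--     ("goldfish", lambda v: v < 5),
--     ("trees", lambda v: v > 3),
--     ("cars", lambda v: v == 2),
--     ("perfumes", lambda v: v == 1),
-- ]
--
--
-- def find_the_aunt(aunt_dictionary):
--     # Staged sieve: one full filtering pass per constraint, narrowing the
--     # surviving dictionary ten times (outer loop over constraints, not aunts).
--     survivors = dict(aunt_dictionary)
--     for prop, ok in CONSTRAINTS:
--         survivors = {k: v for k, v in survivors.items()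
--                      if prop not in v or ok(v[prop])}
--     return survivors
-- ===== Notes on version B (the rewrite author's own statement) =====
-- stated objective: alternative
-- what changed: A makes a single pass over the aunts, testing each against a hardcoded ten-branch elif chain and deleting failures from a copy; B transposes the traversal into a staged sieve: it loops over a constraint table and performs one full filtering pass over the surviving dictionary per constraint (ten successive narrowing passes).
import Mathlib
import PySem

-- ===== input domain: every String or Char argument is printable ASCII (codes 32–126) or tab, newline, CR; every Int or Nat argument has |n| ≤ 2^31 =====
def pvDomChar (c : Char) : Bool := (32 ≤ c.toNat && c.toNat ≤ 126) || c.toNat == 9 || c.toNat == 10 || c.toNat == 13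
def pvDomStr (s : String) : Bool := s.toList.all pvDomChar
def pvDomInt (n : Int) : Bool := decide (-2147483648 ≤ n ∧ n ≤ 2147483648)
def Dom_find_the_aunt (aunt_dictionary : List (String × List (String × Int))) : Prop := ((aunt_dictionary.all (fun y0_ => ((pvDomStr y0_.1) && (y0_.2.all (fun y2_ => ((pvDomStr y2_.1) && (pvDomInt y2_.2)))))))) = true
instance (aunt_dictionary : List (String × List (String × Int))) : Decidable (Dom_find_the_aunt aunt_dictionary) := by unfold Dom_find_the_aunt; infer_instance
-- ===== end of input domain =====

-- B replaces A's single pass over aunts with an elif chain and delete-from-a-copy by a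
-- staged sieve: one filtering pass over the surviving dictionary per constraint in a
-- table (objective: alternative); equal return value proved for association lists with
-- distinct aunt names (Python dict keys are unique).


-- ===== PORT A =====
-- inner dict .get(k): first match in the association list, None = none
def pyDictGet (values : List (String × Int)) (k : String) : Option Int :=
  match values with
  | [] => none
  | (k', v) :: rest => if k' == k then some v else pyDictGet rest k

-- del d[key]: remove the (unique, in a Python dict) first binding of key
def pyDictDel (d : List (String × List (String × Int))) (k : String) :
    List (String × List (String × Int)) :=
  match d with
  | [] => []
  | (k', v) :: rest => if k' == k then rest else (k', v) :: pyDictDel rest k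

-- the elif chain of A's loop body: true exactly when this aunt gets deleted
-- ('values.get(p) is not None and values.get(p) <= b' is Option.any (· ≤ b))
def auntFails (values : List (String × Int)) : Bool :=
  if !(pyDictGet values "children" == some 3 || pyDictGet values "children" == none) then true
  else if (pyDictGet values "cats").any (fun c => decide (c ≤ 7)) then true
  else if !(pyDictGet values "samoyeds" == some 2 || pyDictGet values "samoyeds" == none) then true
  else if (pyDictGet values "pomeranians").any (fun c => decide (c ≥ 3)) then true
  else if !(pyDictGet values "akitas" == some 0 || pyDictGet values "akitas" == none) then true
  else if !(pyDictGet values "vizslas" == some 0 || pyDictGet values "vizslas" == none) then true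
  else if (pyDictGet values "goldfish").any (fun c => decide (c ≥ 5)) then true
  else if (pyDictGet values "trees").any (fun c => decide (c ≤ 3)) then true
  else if !(pyDictGet values "cars" == some 2 || pyDictGet values "cars" == none) then true
  else if !(pyDictGet values "perfumes" == some 1 || pyDictGet values "perfumes" == none) then true
  else false

def find_the_aunt (aunt_dictionary : List (String × List (String × Int))) : List (String × List (String × Int)) :=
  aunt_dictionary.foldl
    (fun potential_aunts_2 kv =>
      if auntFails kv.2 then pyDictDel potential_aunts_2 kv.1 else potential_aunts_2)
    aunt_dictionary

-- ===== PORT B =====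
def constraintTable : List (String × (Int → Bool)) :=
  [("children", fun v => v == 3), ("cats", fun v => decide (v > 7)),
   ("samoyeds", fun v => v == 2), ("pomeranians", fun v => decide (v < 3)),
   ("akitas", fun v => v == 0), ("vizslas", fun v => v == 0),
   ("goldfish", fun v => decide (v < 5)), ("trees", fun v => decide (v > 3)),
   ("cars", fun v => v == 2), ("perfumes", fun v => v == 1)]

-- 'prop not in v or ok(v[prop])' for one constraint is Option.all ok on first-match lookup
def find_the_aunt_alt (aunt_dictionary : List (String × List (String × Int))) : List (String × List (String × Int)) :=
  constraintTable.foldl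
    (fun survivors pc => survivors.filter (fun kv => (kv.2.lookup pc.1).all pc.2))
    aunt_dictionary

-- ===== PRECONDITION & SPEC =====
-- Pre_ requires the aunt names (outer keys) to be pairwise distinct: a Python dict
-- always has unique keys, so an association list with duplicate keys represents no
-- input of the Python programs; it excludes nothing a Python dict input can be.
def Pre_find_the_aunt (aunt_dictionary : List (String × List (String × Int))) : Prop :=
  (aunt_dictionary.map Prod.fst).Nodup
instance (aunt_dictionary : List (String × List (String × Int))) : Decidable (Pre_find_the_aunt aunt_dictionary) := by unfold Pre_find_the_aunt; infer_instance

def pvWitness_find_the_aunt : (List (String × List (String × Int))) :=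
  [("Sue 1", [("cats", 8), ("children", 3)]), ("Sue 2", [("trees", 1)])]

def Spec_find_the_aunt (aunt_dictionary : List (String × List (String × Int))) (out : List (String × List (String × Int))) : Prop := out = find_the_aunt_alt aunt_dictionary
instance (aunt_dictionary : List (String × List (String × Int))) (out : List (String × List (String × Int))) : Decidable (Spec_find_the_aunt aunt_dictionary out) := by unfold Spec_find_the_aunt; infer_instance

-- ===== CLAIM (what is proved, stated in full; the proofs are below) =====
def Claim_equal_find_the_aunt : Prop := ∀ (aunt_dictionary : List (String × List (String × Int))), Dom_find_the_aunt aunt_dictionary → Pre_find_the_aunt aunt_dictionary → Spec_find_the_aunt aunt_dictionary (find_the_aunt aunt_dictionary)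

-- ===== LEMMAS AND PROOFS =====
-- the per-aunt predicate that the staged sieve cumulatively enforces
def auntPasses (values : List (String × Int)) : Bool :=
  constraintTable.all (fun pc => (values.lookup pc.1).all pc.2)

theorem pyDictGet_eq_lookup (values : List (String × Int)) (k : String) :
    pyDictGet values k = values.lookup k := by
  induction values with
  | nil => rfl
  | cons hd tl ih =>
      obtain ⟨k', v⟩ := hd
      simp only [pyDictGet, List.lookup]
      by_cases h : k' = k
      · simp [h]
      · have h1 : (k' == k) = false := by simp [h]
        have h2 : (k == k') = false := by
          simp only [beq_eq_false_iff_ne, ne_eq]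
          exact fun hh => h hh.symm
        simp [h1, h2, ih]

theorem or_eq_all (o : Option Int) (n : Int) :
    (o == some n || o == none) = o.all (fun x => x == n) := by
  cases o <;> simp

theorem any_le_eq_not_all (o : Option Int) (b : Int) :
    (o.any fun c => decide (c ≤ b)) = !(o.all fun x => decide (b < x)) := by
  cases o with
  | none => simp
  | some c =>
      simp only [Option.any_some, Option.all_some, ← decide_not, decide_eq_decide]
      omega

theorem any_ge_eq_not_all (o : Option Int) (b : Int) :
    (o.any fun c => decide (b ≤ c)) = !(o.all fun x => decide (x < b)) := by
  cases o with
  | none => simp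
  | some c =>
      simp only [Option.any_some, Option.all_some, ← decide_not, decide_eq_decide]
      omega

theorem fails_eq_not_passes (values : List (String × Int)) :
    auntFails values = !auntPasses values := by
  simp only [auntFails, auntPasses, constraintTable, List.all_cons, List.all_nil,
    pyDictGet_eq_lookup, or_eq_all, any_le_eq_not_all, any_ge_eq_not_all, Bool.and_true]
  generalize (values.lookup "children").all _ = b1
  generalize (values.lookup "cats").all _ = b2
  generalize (values.lookup "samoyeds").all _ = b3
  generalize (values.lookup "pomeranians").all _ = b4
  generalize (values.lookup "akitas").all _ = b5
  generalize (values.lookup "vizslas").all _ = b6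
  generalize (values.lookup "goldfish").all _ = b7
  generalize (values.lookup "trees").all _ = b8
  generalize (values.lookup "cars").all _ = b9
  generalize (values.lookup "perfumes").all _ = b10
  revert b1 b2 b3 b4 b5 b6 b7 b8 b9 b10
  decide

theorem pyDictDel_append (pre rest : List (String × List (String × Int)))
    (k : String) (v : List (String × Int)) (hk : k ∉ pre.map Prod.fst) :
    pyDictDel (pre ++ (k, v) :: rest) k = pre ++ rest := by
  induction pre with
  | nil => simp [pyDictDel]
  | cons hd tl ih =>
      obtain ⟨k', v'⟩ := hd
      simp only [List.map_cons, List.mem_cons] at hk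
      have hne : (k' == k) = false := by
        simp only [beq_eq_false_iff_ne, ne_eq]
        exact fun hh => hk (Or.inl hh.symm)
      have htl : k ∉ tl.map Prod.fst := fun hh => hk (Or.inr hh)
      simp only [List.cons_append, pyDictDel, hne]
      simp [ih htl]

theorem foldl_del_eq_filter (l pre : List (String × List (String × Int)))
    (h : ((pre ++ l).map Prod.fst).Nodup) :
    l.foldl (fun potential_aunts_2 kv =>
        if auntFails kv.2 then pyDictDel potential_aunts_2 kv.1 else potential_aunts_2)
      (pre ++ l) = pre ++ l.filter (fun kv => auntPasses kv.2) := by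
  induction l generalizing pre with
  | nil => simp
  | cons kv rest ih =>
      obtain ⟨k, v⟩ := kv
      have h' := h
      simp only [List.map_append, List.map_cons, List.nodup_append', List.nodup_cons] at h'
      simp only [List.foldl_cons]
      by_cases hf : auntFails v = true
      · have hk : k ∉ pre.map Prod.fst := fun hmem => h'.2.2 hmem (by simp)
        have hp : auntPasses v = false := by
          have hfp := fails_eq_not_passes v; rw [hf] at hfp
          cases hpv : auntPasses v
          · rfl
          · rw [hpv] at hfp; simp at hfp
        have hn : ((pre ++ rest).map Prod.fst).Nodup := by
          simp only [List.map_append, List.nodup_append']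
          exact ⟨h'.1, h'.2.1.2, fun _ ha hb => h'.2.2 ha (List.mem_cons_of_mem _ hb)⟩
        rw [if_pos hf, pyDictDel_append pre rest k v hk, ih pre hn]
        simp [hp]
      · have hp : auntPasses v = true := by
          have hfp := fails_eq_not_passes v
          cases hpv : auntPasses v
          · rw [hpv] at hfp; simp at hfp; exact absurd hfp hf
          · rfl
        have hn : (((pre ++ [(k, v)]) ++ rest).map Prod.fst).Nodup := by simpa using h
        rw [if_neg hf,
          show pre ++ (k, v) :: rest = (pre ++ [(k, v)]) ++ rest by simp,
          ih (pre ++ [(k, v)]) hn]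
        simp [hp]

-- the staged sieve (fold of filters over any constraint list) = one filter by the conjunction
theorem foldl_filter_eq_filter_all (cs : List (String × (Int → Bool)))
    (l : List (String × List (String × Int))) :
    cs.foldl
      (fun survivors pc => survivors.filter (fun kv => (kv.2.lookup pc.1).all pc.2)) l
    = l.filter (fun kv => cs.all (fun pc => (kv.2.lookup pc.1).all pc.2)) := by
  induction cs generalizing l with
  | nil => simp
  | cons c cs ih =>
      simp only [List.foldl_cons, ih, List.filter_filter, List.all_cons]
      exact List.filter_congr (fun kv _ => by rw [Bool.and_comm])

-- ===== VERDICT (by name: the statement is the Claim_ definition above) =====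
theorem find_the_aunt_spec : Claim_equal_find_the_aunt := by
  intro d _ hpre
  unfold Spec_find_the_aunt find_the_aunt find_the_aunt_alt
  rw [foldl_filter_eq_filter_all]
  have := foldl_del_eq_filter d [] (by simpa using hpre)
  simpa [auntPasses] using this
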